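-- pv_equiv track=rewrite | github.com/shawntan/compound-pcfg | ctreec.py | leaf_interval
-- ===== SOURCE A (Python) =====
-- def leaf_interval(depth, start_idx=0):
--     # Leaf interval matrix for in-order
--     # Returns: Left exposed, right exposed, adjacency list, end index
--     if depth == 0:
--         return [start_idx], [start_idx], [], start_idx
--     else:
--         l_l_side, l_r_side, l_adj_list, last_idx = \
--             leaf_interval(depth - 1, start_idx)
--         my_idx = last_idx + 1
--         r_l_side, r_r_side, r_adj_list, last_idx = \
--             leaf_interval(depth - 1, my_idx + 1)
--         return (
--             [my_idx] + l_l_side,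
--             [my_idx] + r_r_side,
--             [(l, r) for l in l_r_side
--              for r in r_l_side] + l_adj_list + r_adj_list,
--             last_idx
--         )
-- ===== SOURCE B (Python) =====
-- def leaf_interval(depth, start_idx=0):
--     # Iterative bottom-up: start from a leaf and grow the tree level by level,
--     # deriving each right subtree by shifting the current result with an offset.
--     ll, lr, adj, last = [start_idx], [start_idx], [], start_idx
--     for _ in range(depth):
--         my_idx = last + 1
--         off = my_idx + 1 - start_idx
--         adj = [(l, r + off) for l in lr for r in ll] + adj \
--             + [(l + off, r + off) for (l, r) in adj]
--         ll = [my_idx] + ll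
--         lr = [my_idx] + [x + off for x in lr]
--         last = last + off
--     return ll, lr, adj, last
-- ===== Notes on version B (the rewrite author's own statement) =====
-- stated objective: alternative
-- what changed: B replaces A's doubly-recursive divide-and-conquer (two recursive calls per node) with an iterative bottom-up loop that grows the tree level by level, deriving each level's right subtree by an arithmetic offset shift of the accumulated result.
import Mathlib
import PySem

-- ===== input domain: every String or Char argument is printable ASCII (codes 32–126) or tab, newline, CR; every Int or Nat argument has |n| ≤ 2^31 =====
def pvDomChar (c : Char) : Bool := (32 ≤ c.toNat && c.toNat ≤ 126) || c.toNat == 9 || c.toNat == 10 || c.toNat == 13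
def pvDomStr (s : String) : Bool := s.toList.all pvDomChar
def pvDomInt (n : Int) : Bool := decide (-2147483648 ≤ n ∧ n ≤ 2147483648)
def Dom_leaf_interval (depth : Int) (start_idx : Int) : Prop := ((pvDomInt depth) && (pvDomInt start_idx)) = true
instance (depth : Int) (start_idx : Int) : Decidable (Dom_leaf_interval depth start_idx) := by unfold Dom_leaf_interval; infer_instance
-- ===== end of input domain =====

-- B replaces A's doubly-recursive divide-and-conquer with an iterative bottom-up loop
-- (one offset-shift step per level instead of two recursive calls).

-- ===== PORT A =====
-- A's recursion descends on `depth`; it returns only for depth ≥ 0 (Pre_), so the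
-- port recurses on the Nat value of depth.
def leafIntervalA : Nat → Int → List Int × List Int × (List (Int × Int)) × Int
  | 0, start_idx => ([start_idx], [start_idx], [], start_idx)
  | n + 1, start_idx =>
      let (l_l_side, l_r_side, l_adj_list, last_idx) := leafIntervalA n start_idx
      let my_idx := last_idx + 1
      let (r_l_side, r_r_side, r_adj_list, last_idx') := leafIntervalA n (my_idx + 1)
      (my_idx :: l_l_side,
       my_idx :: r_r_side,
       (l_r_side.flatMap fun l => r_l_side.map fun r => (l, r)) ++ l_adj_list ++ r_adj_list,
       last_idx')

def leaf_interval (depth : Int) (start_idx : Int) : List Int × List Int × (List (Int × Int)) × Int :=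
  leafIntervalA depth.toNat start_idx

-- ===== PORT B =====
-- one loop iteration of Source B's `for _ in range(depth)` body
def leafStepB (start_idx : Int) (st : List Int × List Int × (List (Int × Int)) × Int) :
    List Int × List Int × (List (Int × Int)) × Int :=
  let (ll, lr, adj, last) := st
  let my_idx := last + 1
  let off := my_idx + 1 - start_idx
  let adj' := (lr.flatMap fun l => ll.map fun r => (l, r + off)) ++ adj
      ++ adj.map (fun p => (p.1 + off, p.2 + off))
  (my_idx :: ll, my_idx :: lr.map (· + off), adj', last + off)

def leaf_interval_alt (depth : Int) (start_idx : Int) : List Int × List Int × (List (Int × Int)) × Int :=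
  (List.range depth.toNat).foldl (fun st _ => leafStepB start_idx st)
    ([start_idx], [start_idx], [], start_idx)

-- ===== PRECONDITION & SPEC =====
-- A recurses on depth-1 and only depth == 0 stops it: negative depth never returns (RecursionError).
def Pre_leaf_interval (depth : Int) (start_idx : Int) : Prop := 0 ≤ depth
instance (depth : Int) (start_idx : Int) : Decidable (Pre_leaf_interval depth start_idx) := by unfold Pre_leaf_interval; infer_instance
def pvWitness_leaf_interval : Int × Int := (3, 0)

def Spec_leaf_interval (depth : Int) (start_idx : Int) (out : List Int × List Int × (List (Int × Int)) × Int) : Prop := out = leaf_interval_alt depth start_idx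
instance (depth : Int) (start_idx : Int) (out : List Int × List Int × (List (Int × Int)) × Int) : Decidable (Spec_leaf_interval depth start_idx out) := by unfold Spec_leaf_interval; infer_instance

-- ===== CLAIM (what is proved, stated in full; the proofs are below) =====
def Claim_equal_leaf_interval : Prop := ∀ (depth : Int) (start_idx : Int), Dom_leaf_interval depth start_idx → Pre_leaf_interval depth start_idx → Spec_leaf_interval depth start_idx (leaf_interval depth start_idx)

-- ===== LEMMAS AND PROOFS =====

/-- Shift lemma: A's recursion is translation-equivariant in `start_idx`. -/
theorem leafIntervalA_shift (n : Nat) (s c : Int) :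
    leafIntervalA n (s + c) =
      ((leafIntervalA n s).1.map (· + c),
       (leafIntervalA n s).2.1.map (· + c),
       (leafIntervalA n s).2.2.1.map (fun p => (p.1 + c, p.2 + c)),
       (leafIntervalA n s).2.2.2 + c) := by
  induction n generalizing s with
  | zero => simp [leafIntervalA]
  | succ n ih =>
      simp only [leafIntervalA, ih]
      obtain ⟨ll, lr, ladj, last⟩ := leafIntervalA n s
      simp only []
      have h2 : last + c + 1 + 1 = (last + 1 + 1) + c := by ring
      rw [h2, ih]
      obtain ⟨ll2, lr2, ladj2, last2⟩ := leafIntervalA n (last + 1 + 1)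
      simp only [List.map_cons, List.map_append, List.map_flatMap, List.flatMap_map,
        List.map_map, Prod.mk.injEq, List.cons.injEq]
      refine ⟨⟨by ring, trivial⟩, ⟨by ring, trivial⟩, rfl, trivial⟩

/-- One B-loop step applied to A's result for depth n gives A's result for depth n+1. -/
theorem leafStepB_A (n : Nat) (s : Int) :
    leafStepB s (leafIntervalA n s) = leafIntervalA (n + 1) s := by
  rcases h : leafIntervalA n s with ⟨ll, lr, ladj, last⟩
  have hshift := leafIntervalA_shift n s (last + 1 + 1 - s)
  rw [h] at hshift
  have hs : s + (last + 1 + 1 - s) = last + 1 + 1 := by ring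
  rw [hs] at hshift
  simp only at hshift
  simp only [leafIntervalA, h, hshift, leafStepB]
  simp [List.map_map, Function.comp_def]

/-- B's fold over `range n` computes A's result for depth n. -/
theorem leafFoldB_eq (n : Nat) (s : Int) :
    (List.range n).foldl (fun st _ => leafStepB s st) ([s], [s], [], s) = leafIntervalA n s := by
  induction n with
  | zero => rfl
  | succ n ih =>
      rw [List.range_succ, List.foldl_append, ih]
      simpa using leafStepB_A n s

-- ===== VERDICT (by name: the statement is the Claim_ definition above) =====
theorem leaf_interval_spec : Claim_equal_leaf_interval := by
  intro depth start_idx _ _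
  unfold Spec_leaf_interval leaf_interval leaf_interval_alt
  exact (leafFoldB_eq _ _).symm
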